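-- pv_equiv track=rewrite | github.com/tariq-hasan/leetcode | coding_patterns/09-bit-manipulation/01-xor-applications/medium_1915_number_of_wonderful_substrings.py | wonderfulSubstrings_v4
-- ===== SOURCE A (Python) =====
-- def wonderfulSubstrings_v4(word: str) -> int:
--     """
--     Approach 4: Detailed Explanation Version
--     Time: O(n)
--     Space: O(1)
--
--     Same as approach 1 but with detailed comments for learning.
--     """
--     # Each bit in mask represents whether character has odd frequency
--     # mask = 0 means all characters have even frequency
--     # mask with exactly one bit set means one character has odd frequency
--
--     mask_frequency = {}
--     mask_frequency[0] = 1  # Empty prefix contributes one way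
--
--     current_mask = 0
--     wonderful_count = 0
--
--     for i, char in enumerate(word):
--         char_index = ord(char) - ord('a')
--
--         # XOR flips the bit: 0->1 (even to odd), 1->0 (odd to even)
--         current_mask ^= (1 << char_index)
--
--         # Scenario 1: All characters in substring have even frequency
--         # This happens when current_mask equals some previous mask
--         if current_mask in mask_frequency:
--             wonderful_count += mask_frequency[current_mask]
--
--         # Scenario 2: Exactly one character has odd frequency
--         # This happens when current_mask differs from previous mask by exactly one bit
--         for bit in range(10):
--             # Create mask that differs by one bit
--             target_mask = current_mask ^ (1 << bit)
--             if target_mask in mask_frequency: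
--                 wonderful_count += mask_frequency[target_mask]
--
--         # Update frequency count for current mask
--         mask_frequency[current_mask] = mask_frequency.get(current_mask, 0) + 1
--
--     return wonderful_count
-- ===== SOURCE B (Python) =====
-- def wonderfulSubstrings_v4(word: str) -> int:
--     # Naive re-implementation: build the prefix XOR-parity masks explicitly,
--     # then count the pairs of prefixes whose masks differ in at most one of
--     # the ten letter bits a-j (mask == 0, or a single set bit below 2**10).
--     prefixes = [0]
--     m = 0
--     for ch in word:
--         m ^= 1 << (ord(ch) - ord('a'))
--         prefixes.append(m)
--     total = 0
--     for q in range(len(prefixes)):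
--         mq = prefixes[q]
--         for mp in prefixes[:q]:
--             x = mp ^ mq
--             if x & (x - 1) == 0 and x < 1024:
--                 total += 1
--     return total
-- ===== Notes on version B (the rewrite author's own statement) =====
-- stated objective: alternative
-- what changed: Replaced the single-pass prefix-mask hashmap (frequency dict probed at 11 neighbour masks per step) by an explicit prefix-mask list followed by a naive O(n^2) scan over all prefix pairs, directly testing that at most one of the ten letter bits is odd with x & (x-1) == 0 and x < 1024.
import Mathlib
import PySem

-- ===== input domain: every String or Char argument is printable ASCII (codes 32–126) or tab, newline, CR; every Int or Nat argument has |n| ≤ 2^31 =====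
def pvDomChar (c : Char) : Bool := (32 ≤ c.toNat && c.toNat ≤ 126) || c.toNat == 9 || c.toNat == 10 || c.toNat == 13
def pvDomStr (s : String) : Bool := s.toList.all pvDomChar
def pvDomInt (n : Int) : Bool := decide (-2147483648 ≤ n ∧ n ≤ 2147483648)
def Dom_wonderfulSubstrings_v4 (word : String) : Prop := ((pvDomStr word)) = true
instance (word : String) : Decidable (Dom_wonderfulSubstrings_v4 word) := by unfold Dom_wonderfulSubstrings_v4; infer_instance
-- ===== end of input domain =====

-- B replaces A's one-pass prefix-mask frequency dict (probed at 11 neighbour masks per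
-- step) by an explicit prefix-mask list and a naive quadratic scan over all prefix pairs
-- (objective: alternative decomposition, not faster).

-- ===== PORT A =====
-- masks are XORs of single bits 1 <<< (ord c - 97), hence nonnegative: kept as Nat
def wonderfulSubstrings_v4 (word : String) : Int :=
  -- mask_frequency = {}; mask_frequency[0] = 1
  let d0 : PySem.Dict Nat Int := PySem.Dict.insert PySem.Dict.empty 0 1
  let res := word.toList.foldl
    (fun (st : PySem.Dict Nat Int × Nat × Int) ch =>
      -- char_index = ord(char) - ord('a')   (Pre_ keeps ch ≥ 'a', so Nat subtraction is exact)
      let charIndex := ch.toNat - 97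
      -- current_mask ^= (1 << char_index)
      let mask := st.2.1 ^^^ (1 <<< charIndex)
      -- if current_mask in mask_frequency: wonderful_count += mask_frequency[current_mask]
      let cnt1 : Int :=
        match PySem.Dict.get? st.1 mask with
        | some v => st.2.2 + v
        | none => st.2.2
      -- for bit in range(10): target = current_mask ^ (1 << bit); if target in mask_frequency: ...
      let cnt2 : Int := (List.range 10).foldl
        (fun cnt bit =>
          match PySem.Dict.get? st.1 (mask ^^^ (1 <<< bit)) with
          | some v => cnt + v
          | none => cnt) cnt1
      -- mask_frequency[current_mask] = mask_frequency.get(current_mask, 0) + 1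
      (PySem.Dict.insert st.1 mask (PySem.Dict.getD st.1 mask 0 + 1), mask, cnt2))
    (d0, 0, 0)
  res.2.2

-- ===== PORT B =====
def wonderfulSubstrings_v4_alt (word : String) : Int :=
  -- prefixes = [0]; m = 0; for ch in word: m ^= 1 << (ord(ch)-97); prefixes.append(m)
  let prefixes : List Nat := (word.toList.foldl
    (fun (st : List Nat × Nat) ch =>
      let m := st.2 ^^^ (1 <<< (ch.toNat - 97))
      (st.1 ++ [m], m)) ([0], 0)).1
  -- for q in range(len(prefixes)): for mp in prefixes[:q]: ...
  (List.range prefixes.length).foldl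
    (fun tot q =>
      let mq := prefixes.getD q 0   -- prefixes[q], q < len(prefixes): exact
      (PySem.List.slice prefixes none (some (q : Int))).foldl
        (fun tot mp =>
          let x := mp ^^^ mq
          if x &&& (x - 1) = 0 ∧ x < 1024 then tot + 1 else tot) tot) 0

-- ===== PRECONDITION & SPEC =====
-- Pre_ excludes exactly the inputs on which the Python A raises ValueError
-- ("negative shift count" for any character below 'a'); B raises there too.
def Pre_wonderfulSubstrings_v4 (word : String) : Prop :=
  word.toList.all (fun c => 97 ≤ c.toNat) = true
instance (word : String) : Decidable (Pre_wonderfulSubstrings_v4 word) := by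
  unfold Pre_wonderfulSubstrings_v4; infer_instance
def pvWitness_wonderfulSubstrings_v4 : String := "abcab"

def Spec_wonderfulSubstrings_v4 (word : String) (out : Int) : Prop := out = wonderfulSubstrings_v4_alt word
instance (word : String) (out : Int) : Decidable (Spec_wonderfulSubstrings_v4 word out) := by unfold Spec_wonderfulSubstrings_v4; infer_instance

-- ===== CLAIM (what is proved, stated in full; the proofs are below) =====
def Claim_equal_wonderfulSubstrings_v4 : Prop := ∀ (word : String), Dom_wonderfulSubstrings_v4 word → Pre_wonderfulSubstrings_v4 word → Spec_wonderfulSubstrings_v4 word (wonderfulSubstrings_v4 word)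

-- ===== LEMMAS AND PROOFS =====

-- the parity bit a character toggles
def pvBit (c : Char) : Nat := 1 <<< (c.toNat - 97)

-- B's substring test as a predicate on the XOR of two prefix masks
def pvGood (x : Nat) : Bool := decide (x &&& (x - 1) = 0 ∧ x < 1024)

-- the masks A counts: 0 and the ten single bits a..j
def pvBase : List Nat := 0 :: (List.range 10).map (fun b => 1 <<< b)

-- prefix masks after the start mask m, one per remaining character
def pvTail (m : Nat) : List Char → List Nat
  | [] => []
  | c :: cs => (m ^^^ pvBit c) :: pvTail (m ^^^ pvBit c) cs

-- common reference count: good pairs (earlier prefix, later prefix)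
def pvPairs : List Nat → List Nat → Nat
  | _, [] => 0
  | seen, x :: rest => seen.countP (fun y => pvGood (y ^^^ x)) + pvPairs (seen ++ [x]) rest

set_option maxRecDepth 10000 in
theorem pvGood_small : ∀ z ∈ List.range 1024, pvGood z = decide (z ∈ pvBase) := by decide

theorem pvGood_iff (z : Nat) : pvGood z = true ↔ z ∈ pvBase := by
  by_cases h : z < 1024
  · have := pvGood_small z (by simpa using h)
    simp [this]
  · constructor
    · intro hg; exact absurd ((of_decide_eq_true hg).2) h
    · intro hm
      have : z < 1024 := by
        simp [pvBase, List.range_succ] at hm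
        rcases hm with h0 | h1 <;> omega
      omega

theorem pv_countP_or (p q : Nat → Prop) [DecidablePred p] [DecidablePred q]
    (hd : ∀ x, p x → ¬ q x) (l : List Nat) :
    l.countP (fun y => decide (p y ∨ q y))
      = l.countP (fun y => decide (p y)) + l.countP (fun y => decide (q y)) := by
  induction l with
  | nil => simp
  | cons x l ih =>
    simp only [List.countP_cons, ih]
    by_cases hp : p x <;> by_cases hq : q x <;> simp_all <;> omega

theorem pv_countP_mem (ts : List Nat) (h : ts.Nodup) (l : List Nat) :
    l.countP (fun y => decide (y ∈ ts)) = (ts.map (fun t => l.count t)).sum := by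
  induction ts with
  | nil => simp
  | cons t ts ih =>
    simp only [List.nodup_cons] at h
    calc l.countP (fun y => decide (y ∈ t :: ts))
        = l.countP (fun y => decide (y = t ∨ y ∈ ts)) := by
          apply List.countP_congr; intro y _; simp
      _ = l.countP (fun y => decide (y = t)) + l.countP (fun y => decide (y ∈ ts)) := by
          apply pv_countP_or; intro x hx; rw [hx]; exact fun hm => h.1 hm
      _ = ((t :: ts).map (fun t => l.count t)).sum := by
          rw [ih h.2]
          simp only [List.map_cons, List.sum_cons, List.count]
          congr 1

theorem pv_countGood (seen : List Nat) (m : Nat) :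
    seen.countP (fun y => pvGood (y ^^^ m))
      = seen.count m + ((List.range 10).map (fun b => seen.count (m ^^^ (1 <<< b)))).sum := by
  have hinj : Function.Injective (fun t : Nat => t ^^^ m) := by
    intro a b hab
    have := congrArg (· ^^^ m) hab
    simpa [Nat.xor_xor_cancel_right] using this
  have h1 : seen.countP (fun y => pvGood (y ^^^ m))
      = seen.countP (fun y => decide (y ∈ pvBase.map (fun t => t ^^^ m))) := by
    apply List.countP_congr; intro y _
    have h2 : pvGood (y ^^^ m) = decide (y ^^^ m ∈ pvBase) := by
      by_cases h : y ^^^ m ∈ pvBase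
      · simp [h, (pvGood_iff _).mpr h]
      · rw [decide_eq_false h, Bool.eq_false_iff]
        exact fun hg => h ((pvGood_iff _).mp hg)
    rw [h2]
    simp only [decide_eq_true_eq, List.mem_map]
    constructor
    · intro h; exact ⟨y ^^^ m, h, Nat.xor_xor_cancel_right y m⟩
    · rintro ⟨t, ht, rfl⟩
      simpa [Nat.xor_xor_cancel_right] using ht
  rw [h1, pv_countP_mem _ (List.Nodup.map hinj (by decide))]
  simp only [pvBase, List.map_cons, List.map_map, List.sum_cons, Nat.zero_xor,
    Function.comp_def]
  congr 1
  apply congrArg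
  apply List.map_congr_left
  intro b _
  rw [Nat.xor_comm]

-- the list accumulated by B's first loop
theorem pvBuild (cs : List Char) (acc : List Nat) (m : Nat) :
    (cs.foldl
      (fun (st : List Nat × Nat) ch =>
        let mm := st.2 ^^^ (1 <<< (ch.toNat - 97))
        (st.1 ++ [mm], mm)) (acc, m)).1 = acc ++ pvTail m cs := by
  induction cs generalizing acc m with
  | nil => simp [pvTail]
  | cons c cs ih =>
    simp only [List.foldl_cons, pvTail]
    rw [ih]
    simp [pvBit]

-- the double range loop of B counts exactly the pvPairs of the mask list
theorem pvSum (rest seen : List Nat) :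
    ((List.range rest.length).map
       (fun i => (((seen ++ rest).take (seen.length + i)).countP
           (fun y => pvGood (y ^^^ (seen ++ rest).getD (seen.length + i) 0)) : Int))).sum
     = (pvPairs seen rest : Int) := by
  induction rest generalizing seen with
  | nil => simp [pvPairs]
  | cons x rest ih =>
    simp only [List.length_cons]
    rw [List.range_succ_eq_map]
    simp only [List.map_cons, List.map_map, List.sum_cons, Function.comp_def]
    have hhead : ((seen ++ x :: rest).take (seen.length + 0)).countP
        (fun y => pvGood (y ^^^ (seen ++ x :: rest).getD (seen.length + 0) 0))
        = seen.countP (fun y => pvGood (y ^^^ x)) := by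
      have ht : (seen ++ x :: rest).take seen.length = seen := List.take_left
      have hg : (seen ++ x :: rest).getD seen.length 0 = x := by
        simp [List.getD]
      simp only [Nat.add_zero, ht, hg]
    have htail : ∀ i : Nat,
        (((seen ++ x :: rest).take (seen.length + (i + 1))).countP
           (fun y => pvGood (y ^^^ (seen ++ x :: rest).getD (seen.length + (i + 1)) 0)) : Int)
        = ((((seen ++ [x]) ++ rest).take ((seen ++ [x]).length + i)).countP
           (fun y => pvGood (y ^^^ ((seen ++ [x]) ++ rest).getD ((seen ++ [x]).length + i) 0)) : Int) := by
      intro i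
      have h1 : (seen ++ [x]) ++ rest = seen ++ x :: rest := by simp
      have h2 : (seen ++ [x]).length + i = seen.length + (i + 1) := by simp; omega
      rw [h1, h2]
    calc ((seen ++ x :: rest).take (seen.length + 0)).countP
            (fun y => pvGood (y ^^^ (seen ++ x :: rest).getD (seen.length + 0) 0))
          + ((List.range rest.length).map
              (fun i => (((seen ++ x :: rest).take (seen.length + (i + 1))).countP
                (fun y => pvGood (y ^^^ (seen ++ x :: rest).getD (seen.length + (i + 1)) 0)) : Int))).sum
        = (seen.countP (fun y => pvGood (y ^^^ x)) : Int) + (pvPairs (seen ++ [x]) rest : Int) := by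
          rw [hhead, ← ih (seen ++ [x])]
          congr 1
          apply congrArg
          apply List.map_congr_left
          intro i _
          exact htail i
      _ = (pvPairs seen (x :: rest) : Int) := by
          simp [pvPairs]

-- A's loop, with the dict as a frequency table of the seen prefix masks
theorem pvA_loop (cs : List Char) (d : PySem.Dict Nat Int) (m : Nat) (cnt : Int)
    (seen : List Nat)
    (hInv : ∀ x, d.get? x = if seen.count x = 0 then none else some (seen.count x)) :
    (cs.foldl
      (fun (st : PySem.Dict Nat Int × Nat × Int) ch =>
        let charIndex := ch.toNat - 97
        let mask := st.2.1 ^^^ (1 <<< charIndex)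
        let cnt1 : Int :=
          match PySem.Dict.get? st.1 mask with
          | some v => st.2.2 + v
          | none => st.2.2
        let cnt2 : Int := (List.range 10).foldl
          (fun cnt bit =>
            match PySem.Dict.get? st.1 (mask ^^^ (1 <<< bit)) with
            | some v => cnt + v
            | none => cnt) cnt1
        (PySem.Dict.insert st.1 mask (PySem.Dict.getD st.1 mask 0 + 1), mask, cnt2))
      (d, m, cnt)).2.2 = cnt + (pvPairs seen (pvTail m cs) : Int) := by
  induction cs generalizing d m cnt seen with
  | nil => simp [pvTail, pvPairs]
  | cons c cs ih =>
    simp only [List.foldl_cons]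
    have hgetD : PySem.Dict.getD d (m ^^^ (1 <<< (c.toNat - 97))) 0
        = (seen.count (m ^^^ (1 <<< (c.toNat - 97))) : Int) := by
      rw [PySem.Dict.getD_eq_get?_getD, hInv]
      by_cases h : seen.count (m ^^^ (1 <<< (c.toNat - 97))) = 0 <;> simp [h]
    have hcnt1 : (match PySem.Dict.get? d (m ^^^ (1 <<< (c.toNat - 97))) with
        | some v => cnt + v
        | none => cnt) = cnt + (seen.count (m ^^^ (1 <<< (c.toNat - 97))) : Int) := by
      rw [hInv]
      by_cases h : seen.count (m ^^^ (1 <<< (c.toNat - 97))) = 0 <;> simp [h]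
    have hfun : (fun (cnt : Int) (bit : Nat) =>
          match PySem.Dict.get? d ((m ^^^ (1 <<< (c.toNat - 97))) ^^^ (1 <<< bit)) with
          | some v => cnt + v
          | none => cnt)
        = fun (cnt : Int) (bit : Nat) =>
            cnt + (seen.count ((m ^^^ (1 <<< (c.toNat - 97))) ^^^ (1 <<< bit)) : Int) := by
      funext cnt bit
      rw [hInv]
      by_cases h : seen.count ((m ^^^ (1 <<< (c.toNat - 97))) ^^^ (1 <<< bit)) = 0 <;> simp [h]
    rw [hcnt1, hfun, PySem.List.foldl_add
      (g := fun bit : Nat => (seen.count ((m ^^^ (1 <<< (c.toNat - 97))) ^^^ (1 <<< bit)) : Int))]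
    rw [ih _ _ _ (seen ++ [m ^^^ (1 <<< (c.toNat - 97))]) (by
      intro x
      rw [PySem.Dict.get?_insert, hgetD]
      by_cases hx : x = m ^^^ (1 <<< (c.toNat - 97))
      · subst hx
        simp [List.count_append]
      · rw [if_neg hx, hInv]
        have hc : (seen ++ [m ^^^ (1 <<< (c.toNat - 97))]).count x = seen.count x := by
          simp [List.count_append, Ne.symm hx]
        rw [hc])]
    simp only [pvTail, pvBit, pvPairs]
    rw [pv_countGood]
    push_cast
    simp only [List.map_map, Function.comp_def]
    ring

theorem pvA_eq (word : String) :
    wonderfulSubstrings_v4 word = (pvPairs [0] (pvTail 0 word.toList) : Int) := by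
  unfold wonderfulSubstrings_v4
  rw [pvA_loop word.toList _ 0 0 [0] (by
    intro x
    rw [PySem.Dict.get?_insert]
    by_cases hx : x = 0
    · subst hx; simp
    · simp [hx, PySem.Dict.get?_empty, Ne.symm hx])]
  simp

theorem pvB_eq (word : String) :
    wonderfulSubstrings_v4_alt word = (pvPairs [] (0 :: pvTail 0 word.toList) : Int) := by
  unfold wonderfulSubstrings_v4_alt
  rw [pvBuild]
  have h0 : ([0] : List Nat) ++ pvTail 0 word.toList = 0 :: pvTail 0 word.toList := rfl
  rw [h0]
  generalize (0 :: pvTail 0 word.toList : List Nat) = ms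
  dsimp only
  have hc := PySem.List.foldl_congr_mem
      (l := List.range ms.length) (init := (0 : Int))
      (f := fun (tot : Int) (q : Nat) =>
        List.foldl
          (fun tot mp =>
            if (mp ^^^ ms.getD q 0) &&& ((mp ^^^ ms.getD q 0) - 1) = 0 ∧ (mp ^^^ ms.getD q 0) < 1024
            then tot + 1 else tot)
          tot (PySem.List.slice ms none (some (q : Int))))
      (g := fun (tot : Int) (q : Nat) =>
        tot + ((ms.take q).countP (fun y => pvGood (y ^^^ ms.getD q 0)) : Int))
      (by
        intro tot q _
        simp only
        rw [PySem.List.slice_to_natCast, PySem.List.foldl_ite_add_one]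
        simp only [pvGood])
  rw [hc]
  rw [PySem.List.foldl_add
      (g := fun q : Nat => ((ms.take q).countP (fun y => pvGood (y ^^^ ms.getD q 0)) : Int))]
  have := pvSum ms []
  simpa using this
-- ===== VERDICT (by name: the statement is the Claim_ definition above) =====
theorem wonderfulSubstrings_v4_spec : Claim_equal_wonderfulSubstrings_v4 := by
  intro word _ _
  unfold Spec_wonderfulSubstrings_v4
  rw [pvA_eq, pvB_eq]
  simp [pvPairs]
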